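-- pv_equiv track=rewrite | github.com/gottadiveintopython/kivyx | src/kivyx/uix/behaviors/fontsizeadjustment.py | _extract_non_tag_parts
-- ===== SOURCE A (Python) =====
-- import typing
--
-- def _extract_non_tag_parts(text) -> typing.Iterator[str]:
--     cur_pos = 0
--     while True:
--         bra_begin = text.find('[', cur_pos)
--         if bra_begin == -1:
--             yield text[cur_pos:]
--             return
--         yield text[cur_pos:bra_begin]
--         bra_end = text.find(']', bra_begin)
--         if bra_end == -1:
--             return
--         cur_pos = bra_end + 1
-- ===== SOURCE B (Python) =====
-- def _extract_non_tag_parts(text):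
--     buf = []
--     inside = False
--     for c in text:
--         if inside:
--             if c == ']':
--                 inside = False
--         elif c == '[':
--             yield ''.join(buf)
--             buf = []
--             inside = True
--         else:
--             buf.append(c)
--     if not inside:
--         yield ''.join(buf)
-- ===== Notes on version B (the rewrite author's own statement) =====
-- stated objective: alternative
-- what changed: Replaced A's index-jumping str.find scan (compute '[' position, slice, compute ']' position, jump cur_pos) by a character-by-character state machine with an inside_tag flag and a segment buffer.
import Mathlib
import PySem

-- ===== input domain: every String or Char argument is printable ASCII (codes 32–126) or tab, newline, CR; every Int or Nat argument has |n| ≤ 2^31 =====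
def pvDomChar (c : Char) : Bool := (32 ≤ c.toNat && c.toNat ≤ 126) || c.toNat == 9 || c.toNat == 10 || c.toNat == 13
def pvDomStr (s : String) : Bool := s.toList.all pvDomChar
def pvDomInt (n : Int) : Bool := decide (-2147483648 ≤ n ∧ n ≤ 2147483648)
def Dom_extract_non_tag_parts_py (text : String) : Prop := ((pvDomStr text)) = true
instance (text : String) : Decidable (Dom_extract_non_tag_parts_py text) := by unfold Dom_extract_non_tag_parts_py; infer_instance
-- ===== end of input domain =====

-- B replaces A's index-jumping str.find scan by a character-by-character state machine
-- (inside_tag flag + buffer); objective: alternative decomposition, same cost, no behaviour change.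

-- ===== PORT A =====
-- A's 'while True' loop over cur_pos, transcribed as recursion on the remaining suffix
-- (each iteration of A only reads text[cur_pos:]): find '[' ; yield the slice before it;
-- find ']' from there; continue after it.
def extract_non_tag_parts_py_goA (s : List Char) : List String :=
  let bra := PySem.Chars.find s ['[']
  if hbra : bra = -1 then
    [String.ofList s]                                    -- yield text[cur_pos:]
  else
    let seg := String.ofList (PySem.List.slice s none (some bra))   -- yield text[cur_pos:bra_begin]
    let ket := PySem.Chars.findFrom s [']'] bra none
    if hket : ket = -1 then [seg]
    else seg :: extract_non_tag_parts_py_goA (s.drop (ket.toNat + 1))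
termination_by s.length
decreasing_by
  have hs : s ≠ [] := by
    intro h; apply hbra; subst h; rfl
  cases s with
  | nil => exact absurd rfl hs
  | cons a t => simp [List.length_drop]

def extract_non_tag_parts_py (text : String) : List String :=
  extract_non_tag_parts_py_goA text.toList

-- ===== PORT B =====
-- B's for-loop over the characters with state (buf, inside); yields become conses.
def extract_non_tag_parts_py_goB : List Char → List Char → Bool → List String
  | [], buf, inside => if inside then [] else [String.ofList buf]
  | c :: rest, buf, inside =>
    if inside then
      if c = ']' then extract_non_tag_parts_py_goB rest buf false
      else extract_non_tag_parts_py_goB rest buf true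
    else if c = '[' then
      String.ofList buf :: extract_non_tag_parts_py_goB rest [] true
    else
      extract_non_tag_parts_py_goB rest (buf ++ [c]) false

def extract_non_tag_parts_py_alt (text : String) : List String :=
  extract_non_tag_parts_py_goB text.toList [] false

-- ===== PRECONDITION & SPEC =====
def Spec_extract_non_tag_parts_py (text : String) (out : List String) : Prop := out = extract_non_tag_parts_py_alt text
instance (text : String) (out : List String) : Decidable (Spec_extract_non_tag_parts_py text out) := by unfold Spec_extract_non_tag_parts_py; infer_instance

-- ===== CLAIM (what is proved, stated in full; the proofs are below) =====
def Claim_equal_extract_non_tag_parts_py : Prop := ∀ (text : String), Dom_extract_non_tag_parts_py text → Spec_extract_non_tag_parts_py text (extract_non_tag_parts_py text)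

-- ===== LEMMAS AND PROOFS =====

-- prepend a buffer of chars to the first segment of a list of segments
def pvConsHead (buf : List Char) : List String → List String
  | [] => []
  | x :: xs => String.ofList (buf ++ x.toList) :: xs

lemma pvConsHead_nil (l : List String) : pvConsHead [] l = l := by
  cases l <;> simp [pvConsHead, String.ofList_toList]

lemma pvConsHead_assoc (b1 b2 : List Char) (l : List String) :
    pvConsHead b1 (pvConsHead b2 l) = pvConsHead (b1 ++ b2) l := by
  cases l <;> simp [pvConsHead, String.toList_ofList]

-- Python's s.find(b) for a single-char needle is idxOf (or -1 when absent)
lemma pv_findGo_single (b : Char) : ∀ (s : List Char) (k : Nat),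
    PySem.Chars.find.go [b] s k = if b ∈ s then ((k + s.idxOf b : Nat) : Int) else -1 := by
  intro s
  induction s with
  | nil => intro k; simp [PySem.Chars.find.go]
  | cons c t ih =>
    intro k
    by_cases hc : c = b
    · subst hc
      simp [PySem.Chars.find.go, List.isPrefixOf]
    · have hpre : (List.isPrefixOf [b] (c :: t)) = false := by
        simp [List.isPrefixOf]; intro h; exact absurd h.symm hc
      rw [PySem.Chars.find.go, hpre]
      simp only [Bool.false_eq_true, if_false]
      rw [ih (k + 1)]
      by_cases hm : b ∈ t
      · have : b ∈ c :: t := List.mem_cons_of_mem _ hm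
        simp only [hm, if_true, this]
        rw [List.idxOf_cons_ne _ (by exact fun h => hc h)]
        norm_num; omega
      · have : ¬ b ∈ c :: t := by
          intro h; rcases List.mem_cons.mp h with h | h
          · exact hc h.symm
          · exact hm h
        simp [hm, this]

lemma pv_find_single (s : List Char) (b : Char) :
    PySem.Chars.find s [b] = if b ∈ s then ((s.idxOf b : Nat) : Int) else -1 := by
  have := pv_findGo_single b s 0
  simpa [PySem.Chars.find] using this

-- B inside a tag: skip to the first ']' and resume outside (or end if there is none)
lemma pv_goB_true (buf : List Char) : ∀ (s : List Char),
    extract_non_tag_parts_py_goB s buf true =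
      if ']' ∈ s then extract_non_tag_parts_py_goB (s.drop (s.idxOf ']' + 1)) buf false
      else [] := by
  intro s
  induction s with
  | nil => simp [extract_non_tag_parts_py_goB]
  | cons c t ih =>
    by_cases hc : c = ']'
    · subst hc
      simp [extract_non_tag_parts_py_goB, List.idxOf_cons_self]
    · have hmemiff : (']' ∈ c :: t) ↔ (']' ∈ t) := by
        constructor
        · intro h; rcases List.mem_cons.mp h with h | h
          · exact absurd h.symm hc
          · exact h
        · exact List.mem_cons_of_mem _
      rw [extract_non_tag_parts_py_goB]
      simp only [if_true, hc, if_false]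
      rw [ih]
      by_cases hm : ']' ∈ t
      · simp only [hm, if_true, hmemiff.mpr hm, if_true]
        rw [List.idxOf_cons_ne _ (by exact fun h => hc h)]
        rfl
      · simp [hm, hmemiff]

-- A on a cons that is not '[': the head char joins the first segment
lemma pv_goA_cons_ne (c : Char) (t : List Char) (hc : c ≠ '[') :
    extract_non_tag_parts_py_goA (c :: t) = pvConsHead [c] (extract_non_tag_parts_py_goA t) := by
  have hmemiff : ('[' ∈ c :: t) ↔ ('[' ∈ t) := by
    constructor
    · intro h; rcases List.mem_cons.mp h with h | h
      · exact absurd h.symm hc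
      · exact h
    · exact List.mem_cons_of_mem _
  by_cases hm : '[' ∈ t
  · -- '[' present: both take the branch through find/findFrom
    have hi := List.idxOf_lt_length_of_mem hm
    have hfind_s : PySem.Chars.find (c :: t) ['['] = ((t.idxOf '[' + 1 : Nat) : Int) := by
      rw [pv_find_single, if_pos (hmemiff.mpr hm), List.idxOf_cons_ne _ (fun h => hc h)]
    have hfind_t : PySem.Chars.find t ['['] = ((t.idxOf '[' : Nat) : Int) := by
      rw [pv_find_single, if_pos hm]
    rw [extract_non_tag_parts_py_goA, hfind_s,
        dif_neg (by omega : ¬ (((t.idxOf '[' + 1 : Nat) : Int) = -1))]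
    rw [extract_non_tag_parts_py_goA, hfind_t,
        dif_neg (by omega : ¬ (((t.idxOf '[' : Nat) : Int) = -1))]
    rw [PySem.List.slice_to_natCast, PySem.List.slice_to_natCast]
    have hk1 : t.idxOf '[' + 1 ≤ (c :: t).length := by simp; omega
    have hk2 : t.idxOf '[' ≤ t.length := by omega
    rw [PySem.Chars.findFrom_natCast (c :: t) [']'] (t.idxOf '[' + 1) hk1,
        PySem.Chars.findFrom_natCast t [']'] (t.idxOf '[') hk2]
    have hdrop : (c :: t).drop (t.idxOf '[' + 1) = t.drop (t.idxOf '[') := by simp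
    rw [hdrop]
    by_cases hket : PySem.Chars.find (t.drop (t.idxOf '[')) [']'] = -1
    · rw [if_pos hket, if_pos hket, dif_pos rfl, dif_pos rfl]
      simp [pvConsHead]
    · have hmem2 : ']' ∈ t.drop (t.idxOf '[') := by
        by_contra hnm
        apply hket; rw [pv_find_single]; simp [hnm]
      have hketval : PySem.Chars.find (t.drop (t.idxOf '[')) [']'] =
          (((t.drop (t.idxOf '[')).idxOf ']' : Nat) : Int) := by
        rw [pv_find_single, if_pos hmem2]
      rw [if_neg hket, if_neg hket, hketval]
      have e1 : ((t.idxOf '[' + 1 : Nat) : Int) + (((t.drop (t.idxOf '[')).idxOf ']' : Nat) : Int)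
          = ((t.idxOf '[' + 1 + (t.drop (t.idxOf '[')).idxOf ']' : Nat) : Int) := by push_cast; ring
      have e2 : ((t.idxOf '[' : Nat) : Int) + (((t.drop (t.idxOf '[')).idxOf ']' : Nat) : Int)
          = ((t.idxOf '[' + (t.drop (t.idxOf '[')).idxOf ']' : Nat) : Int) := by push_cast; ring
      rw [e1, e2]
      rw [dif_neg (by omega : ¬ (((t.idxOf '[' + 1 + (t.drop (t.idxOf '[')).idxOf ']' : Nat) : Int) = -1))]
      rw [dif_neg (by omega : ¬ (((t.idxOf '[' + (t.drop (t.idxOf '[')).idxOf ']' : Nat) : Int) = -1))]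
      have ht1 : ((t.idxOf '[' + 1 + (t.drop (t.idxOf '[')).idxOf ']' : Nat) : Int).toNat
          = t.idxOf '[' + 1 + (t.drop (t.idxOf '[')).idxOf ']' := by omega
      have ht2 : ((t.idxOf '[' + (t.drop (t.idxOf '[')).idxOf ']' : Nat) : Int).toNat
          = t.idxOf '[' + (t.drop (t.idxOf '[')).idxOf ']' := by omega
      rw [ht1, ht2]
      have hdrop2 : (c :: t).drop (t.idxOf '[' + 1 + (t.drop (t.idxOf '[')).idxOf ']' + 1)
          = t.drop (t.idxOf '[' + (t.drop (t.idxOf '[')).idxOf ']' + 1) := by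
        rw [List.drop_succ_cons]; congr 1; omega
      rw [hdrop2]
      simp [pvConsHead]
  · -- no '[' anywhere: both yield the whole remaining text
    have hfs : PySem.Chars.find (c :: t) ['['] = -1 := by
      rw [pv_find_single]; simp [hmemiff, hm]
    have hft : PySem.Chars.find t ['['] = -1 := by
      rw [pv_find_single]; simp [hm]
    rw [extract_non_tag_parts_py_goA, hfs, dif_pos rfl,
        extract_non_tag_parts_py_goA, hft, dif_pos rfl]
    simp [pvConsHead, String.toList_ofList]

lemma pv_goB_false_cons (c : Char) (rest buf : List Char) :
    extract_non_tag_parts_py_goB (c :: rest) buf false =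
      if c = '[' then String.ofList buf :: extract_non_tag_parts_py_goB rest [] true
      else extract_non_tag_parts_py_goB rest (buf ++ [c]) false := by
  rw [extract_non_tag_parts_py_goB]; simp

lemma pv_main : ∀ (n : Nat) (s : List Char), s.length ≤ n → ∀ (buf : List Char),
    extract_non_tag_parts_py_goB s buf false = pvConsHead buf (extract_non_tag_parts_py_goA s) := by
  intro n
  induction n with
  | zero =>
    intro s hs buf
    have : s = [] := List.eq_nil_of_length_eq_zero (Nat.le_zero.mp hs)
    subst this
    rw [extract_non_tag_parts_py_goA]
    simp [extract_non_tag_parts_py_goB, PySem.Chars.find, PySem.Chars.find.go, pvConsHead]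
  | succ n ih =>
    intro s hs buf
    cases s with
    | nil =>
      rw [extract_non_tag_parts_py_goA]
      simp [extract_non_tag_parts_py_goB, PySem.Chars.find, PySem.Chars.find.go, pvConsHead]
    | cons c t =>
      have hlen : t.length ≤ n := by simpa using hs
      by_cases hc : c = '['
      · subst hc
        -- B: yield buf, enter tag state
        rw [pv_goB_false_cons, if_pos rfl, pv_goB_true]
        -- A: bra = 0, empty segment, search for ']'
        have hfind0 : PySem.Chars.find ('[' :: t) ['['] = ((0 : Nat) : Int) := by
          rw [pv_find_single]; simp [List.idxOf_cons_self]
        rw [extract_non_tag_parts_py_goA]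
        simp only [hfind0, Nat.cast_zero]
        rw [dif_neg (by omega : ¬ ((0 : Int) = -1))]
        have hff : PySem.Chars.findFrom ('[' :: t) [']'] (0 : Int) none = PySem.Chars.find ('[' :: t) [']'] := by
          simp
        rw [hff]
        have hslice : PySem.List.slice ('[' :: t) none (some (0 : Int)) = [] := by
          have : ((0 : Nat) : Int) = (0 : Int) := by norm_num
          rw [← this, PySem.List.slice_to_natCast]; simp
        by_cases hm : ']' ∈ t
        · have hmem : ']' ∈ '[' :: t := List.mem_cons_of_mem _ hm
          have hketval : PySem.Chars.find ('[' :: t) [']'] = ((t.idxOf ']' + 1 : Nat) : Int) := by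
            rw [pv_find_single]; simp only [hmem, if_true]
            rw [List.idxOf_cons_ne _ (by decide : '[' ≠ ']')]
          rw [hketval, dif_neg (by omega : ¬ (((t.idxOf ']' + 1 : Nat) : Int) = -1))]
          have htn : ((t.idxOf ']' + 1 : Nat) : Int).toNat = t.idxOf ']' + 1 := by omega
          rw [htn]
          have hdrop : ('[' :: t).drop (t.idxOf ']' + 1 + 1) = t.drop (t.idxOf ']' + 1) := by
            simp [List.drop_succ_cons]
          rw [hdrop]
          simp only [hm, if_true]
          rw [ih (t.drop (t.idxOf ']' + 1)) (by simp; omega) []]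
          rw [pvConsHead_nil]
          simp [pvConsHead, hslice]
        · have hnm : ¬ ']' ∈ '[' :: t := by
            intro h; rcases List.mem_cons.mp h with h | h
            · exact absurd h.symm (by decide)
            · exact hm h
          have hket : PySem.Chars.find ('[' :: t) [']'] = -1 := by
            rw [pv_find_single]; simp [hnm]
          rw [hket, dif_pos rfl]
          simp [hm, pvConsHead, hslice]
      · rw [pv_goB_false_cons, if_neg hc]
        rw [ih t hlen (buf ++ [c])]
        rw [pv_goA_cons_ne c t hc, pvConsHead_assoc]

-- ===== VERDICT (by name: the statement is the Claim_ definition above) =====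
theorem extract_non_tag_parts_py_spec : Claim_equal_extract_non_tag_parts_py := by
  intro text _
  unfold Spec_extract_non_tag_parts_py extract_non_tag_parts_py extract_non_tag_parts_py_alt
  rw [pv_main text.toList.length text.toList (le_refl _) []]
  rw [pvConsHead_nil]
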